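-- pv_equiv track=rewrite | github.com/Rudra2018/ARTEMIS | ai_tester_core/learning_engine.py | _determine_vulnerability_severity
-- ===== SOURCE A (Python) =====
-- from typing import Dict, List, Any, Optional, Tuple
--
-- def _determine_vulnerability_severity(findings: List[Dict[str, Any]]) -> str:
--     """Determine overall vulnerability severity from findings"""
--     if not findings:
--         return 'none'
--
--     severities = [finding.get('severity', 'low').lower() for finding in findings]
--
--     if 'critical' in severities:
--         return 'critical'
--     elif 'high' in severities:
--         return 'high'
--     elif 'medium' in severities:
--         return 'medium'
--     elif 'low' in severities:
--         return 'low'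
--     else:
--         return 'info'
-- ===== SOURCE B (Python) =====
-- from typing import Dict, List, Any
--
-- _RANK = {'critical': 0, 'high': 1, 'medium': 2, 'low': 3}
-- _NAMES = ['critical', 'high', 'medium', 'low', 'info']
--
--
-- def _determine_vulnerability_severity(findings: List[Dict[str, Any]]) -> str:
--     """Determine overall vulnerability severity from findings (single min-rank pass)."""
--     if not findings:
--         return 'none'
--     m = 4
--     for finding in findings:
--         r = _RANK.get(finding.get('severity', 'low').lower(), 4)
--         if r < m:
--             m = r
--     return _NAMES[m]
-- ===== Notes on version B (the rewrite author's own statement) =====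
-- stated objective: simpler
-- what changed: Replaces the list of severities and the four ordered membership scans by a single pass that tracks the minimum severity rank and indexes a names table.
import Mathlib
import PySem

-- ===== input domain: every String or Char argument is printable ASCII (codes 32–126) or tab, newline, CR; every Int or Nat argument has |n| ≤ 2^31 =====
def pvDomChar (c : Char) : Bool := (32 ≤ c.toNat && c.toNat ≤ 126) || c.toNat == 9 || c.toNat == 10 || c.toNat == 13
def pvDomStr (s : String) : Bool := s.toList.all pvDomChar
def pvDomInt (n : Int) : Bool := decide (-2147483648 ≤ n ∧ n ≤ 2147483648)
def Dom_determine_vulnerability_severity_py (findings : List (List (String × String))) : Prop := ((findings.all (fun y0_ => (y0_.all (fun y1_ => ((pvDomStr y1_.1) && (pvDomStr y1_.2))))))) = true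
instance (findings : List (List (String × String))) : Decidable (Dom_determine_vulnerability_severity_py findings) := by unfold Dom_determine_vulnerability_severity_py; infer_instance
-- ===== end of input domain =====

-- B replaces A's severity list + four ordered membership scans by one min-rank pass over a
-- rank table; objective: simpler (same O(n) cost).

-- shared subexpression of both Pythons: finding.get('severity', 'low').lower()
def pvSev (f : List (String × String)) : String :=
  PySem.Str.lower ((PySem.Dict.mk f).getD "severity" "low")

-- ===== PORT A =====
def determine_vulnerability_severity_py (findings : List (List (String × String))) : String :=
  if findings = [] then "none"
  else
    let severities := findings.map (fun f => pvSev f)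
    if severities.contains "critical" then "critical"
    else if severities.contains "high" then "high"
    else if severities.contains "medium" then "medium"
    else if severities.contains "low" then "low"
    else "info"

-- ===== PORT B =====
def pvRankDict : PySem.Dict String Nat :=
  PySem.Dict.mk [("critical", 0), ("high", 1), ("medium", 2), ("low", 3)]

def pvNames : List String := ["critical", "high", "medium", "low", "info"]

def pvFindingRank (f : List (String × String)) : Nat := pvRankDict.getD (pvSev f) 4

def determine_vulnerability_severity_py_alt (findings : List (List (String × String))) : String :=
  if findings = [] then "none"
  else
    pvNames.getD
      (findings.foldl (fun m f => if pvFindingRank f < m then pvFindingRank f else m) 4) ""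

-- ===== PRECONDITION & SPEC =====
def Spec_determine_vulnerability_severity_py (findings : List (List (String × String))) (out : String) : Prop := out = determine_vulnerability_severity_py_alt findings
instance (findings : List (List (String × String))) (out : String) : Decidable (Spec_determine_vulnerability_severity_py findings out) := by unfold Spec_determine_vulnerability_severity_py; infer_instance

-- ===== CLAIM (what is proved, stated in full; the proofs are below) =====
def Claim_equal_determine_vulnerability_severity_py : Prop := ∀ (findings : List (List (String × String))), Dom_determine_vulnerability_severity_py findings → Spec_determine_vulnerability_severity_py findings (determine_vulnerability_severity_py findings)

-- ===== LEMMAS AND PROOFS =====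

lemma pvRank_spec (s : String) :
    pvRankDict.getD s 4 =
      (if s = "critical" then 0 else if s = "high" then 1
       else if s = "medium" then 2 else if s = "low" then 3 else 4) := by
  by_cases h1 : s = "critical"
  · subst h1; decide
  by_cases h2 : s = "high"
  · subst h2; decide
  by_cases h3 : s = "medium"
  · subst h3; decide
  by_cases h4 : s = "low"
  · subst h4; decide
  simp only [pvRankDict, PySem.Dict.getD_eq_get?_getD, PySem.Dict.get?_mk_cons, beq_iff_eq]
  rw [if_neg (fun h => h1 h.symm), if_neg (fun h => h2 h.symm), if_neg (fun h => h3 h.symm),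
      if_neg (fun h => h4 h.symm), if_neg h1, if_neg h2, if_neg h3, if_neg h4]
  simp [PySem.Dict.get?]

lemma pvRank0 (f : List (String × String)) : pvFindingRank f = 0 ↔ pvSev f = "critical" := by
  unfold pvFindingRank; rw [pvRank_spec]; split_ifs <;> simp_all

lemma pvRank1 (f : List (String × String)) : pvFindingRank f = 1 ↔ pvSev f = "high" := by
  unfold pvFindingRank; rw [pvRank_spec]; split_ifs <;> simp_all

lemma pvRank2 (f : List (String × String)) : pvFindingRank f = 2 ↔ pvSev f = "medium" := by
  unfold pvFindingRank; rw [pvRank_spec]; split_ifs <;> simp_all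

lemma pvRank3 (f : List (String × String)) : pvFindingRank f = 3 ↔ pvSev f = "low" := by
  unfold pvFindingRank; rw [pvRank_spec]; split_ifs <;> simp_all

lemma pvRank_le4 (f : List (String × String)) : pvFindingRank f ≤ 4 := by
  unfold pvFindingRank; rw [pvRank_spec]; split_ifs <;> omega

lemma pvFoldMin_le_iff (l : List (List (String × String))) (acc k : Nat) :
    (l.foldl (fun m f => if pvFindingRank f < m then pvFindingRank f else m) acc) ≤ k ↔
      acc ≤ k ∨ ∃ f ∈ l, pvFindingRank f ≤ k := by
  induction l generalizing acc with
  | nil => simp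
  | cons g t ih =>
    rw [List.foldl_cons, ih]
    have hstep : (if pvFindingRank g < acc then pvFindingRank g else acc) ≤ k ↔
        acc ≤ k ∨ pvFindingRank g ≤ k := by split <;> omega
    rw [hstep]
    simp only [List.mem_cons]
    constructor
    · rintro ((h | h) | ⟨f, hf, hk⟩)
      · exact Or.inl h
      · exact Or.inr ⟨g, Or.inl rfl, h⟩
      · exact Or.inr ⟨f, Or.inr hf, hk⟩
    · rintro (h | ⟨f, hf, hk⟩)
      · exact Or.inl (Or.inl h)
      · rcases hf with rfl | hf
        · exact Or.inl (Or.inr hk)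
        · exact Or.inr ⟨f, hf, hk⟩

-- ===== VERDICT (by name: the statement is the Claim_ definition above) =====
theorem determine_vulnerability_severity_py_spec : Claim_equal_determine_vulnerability_severity_py := by
  intro findings _
  unfold Spec_determine_vulnerability_severity_py
  unfold determine_vulnerability_severity_py determine_vulnerability_severity_py_alt
  by_cases h : findings = []
  · simp [h]
  · simp only [if_neg h]
    have key := fun k => pvFoldMin_le_iff findings 4 k
    obtain ⟨m, hm⟩ : ∃ m, findings.foldl (fun m f => if pvFindingRank f < m then pvFindingRank f else m) 4 = m := ⟨_, rfl⟩
    rw [hm] at key ⊢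
    have h4 : m ≤ 4 := (key 4).mpr (Or.inl le_rfl)
    -- the minimum rank m is ≤ r exactly when some finding has rank ≤ r
    have ex : ∀ r : Nat, (∃ f ∈ findings, pvFindingRank f ≤ r) ↔ m ≤ r := by
      intro r
      constructor
      · intro hr; exact (key r).mpr (Or.inr hr)
      · intro hr
        rcases (key r).mp hr with h' | h'
        · obtain ⟨f, hf⟩ := List.exists_mem_of_ne_nil findings h
          exact ⟨f, hf, le_trans (pvRank_le4 f) h'⟩
        · exact h'
    -- when m ≤ 3, the minimum is attained by some finding
    have exMin : ∀ r : Nat, m = r → r ≤ 3 → ∃ f ∈ findings, pvFindingRank f = r := by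
      intro r hmr hr3
      obtain ⟨f, hf, hfr⟩ := (ex r).mpr hmr.le
      rcases Nat.eq_or_lt_of_le hfr with h' | h'
      · exact ⟨f, hf, h'⟩
      · exfalso
        have : m ≤ r - 1 := (ex (r - 1)).mp ⟨f, hf, by omega⟩
        omega
    interval_cases m
    · obtain ⟨f, hf, hfr⟩ := exMin 0 rfl (by omega)
      have hc : ∃ a ∈ findings, pvSev a = "critical" := ⟨f, hf, (pvRank0 f).mp hfr⟩
      simp [hc, pvNames]
    · have hc : ¬ ∃ a ∈ findings, pvSev a = "critical" := by
        rintro ⟨f, hf, hfs⟩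
        have := (ex 0).mp ⟨f, hf, ((pvRank0 f).mpr hfs).le⟩; omega
      obtain ⟨f, hf, hfr⟩ := exMin 1 rfl (by omega)
      have hh : ∃ a ∈ findings, pvSev a = "high" := ⟨f, hf, (pvRank1 f).mp hfr⟩
      simp [hc, hh, pvNames]
    · have hc : ¬ ∃ a ∈ findings, pvSev a = "critical" := by
        rintro ⟨f, hf, hfs⟩
        have := (ex 0).mp ⟨f, hf, ((pvRank0 f).mpr hfs).le⟩; omega
      have hh : ¬ ∃ a ∈ findings, pvSev a = "high" := by
        rintro ⟨f, hf, hfs⟩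
        have := (ex 1).mp ⟨f, hf, ((pvRank1 f).mpr hfs).le⟩; omega
      obtain ⟨f, hf, hfr⟩ := exMin 2 rfl (by omega)
      have hmed : ∃ a ∈ findings, pvSev a = "medium" := ⟨f, hf, (pvRank2 f).mp hfr⟩
      simp [hc, hh, hmed, pvNames]
    · have hc : ¬ ∃ a ∈ findings, pvSev a = "critical" := by
        rintro ⟨f, hf, hfs⟩
        have := (ex 0).mp ⟨f, hf, ((pvRank0 f).mpr hfs).le⟩; omega
      have hh : ¬ ∃ a ∈ findings, pvSev a = "high" := by
        rintro ⟨f, hf, hfs⟩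
        have := (ex 1).mp ⟨f, hf, ((pvRank1 f).mpr hfs).le⟩; omega
      have hmed : ¬ ∃ a ∈ findings, pvSev a = "medium" := by
        rintro ⟨f, hf, hfs⟩
        have := (ex 2).mp ⟨f, hf, ((pvRank2 f).mpr hfs).le⟩; omega
      obtain ⟨f, hf, hfr⟩ := exMin 3 rfl (by omega)
      have hlow : ∃ a ∈ findings, pvSev a = "low" := ⟨f, hf, (pvRank3 f).mp hfr⟩
      simp [hc, hh, hmed, hlow, pvNames]
    · have hc : ¬ ∃ a ∈ findings, pvSev a = "critical" := by
        rintro ⟨f, hf, hfs⟩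
        have := (ex 0).mp ⟨f, hf, ((pvRank0 f).mpr hfs).le⟩; omega
      have hh : ¬ ∃ a ∈ findings, pvSev a = "high" := by
        rintro ⟨f, hf, hfs⟩
        have := (ex 1).mp ⟨f, hf, ((pvRank1 f).mpr hfs).le⟩; omega
      have hmed : ¬ ∃ a ∈ findings, pvSev a = "medium" := by
        rintro ⟨f, hf, hfs⟩
        have := (ex 2).mp ⟨f, hf, ((pvRank2 f).mpr hfs).le⟩; omega
      have hlow : ¬ ∃ a ∈ findings, pvSev a = "low" := by
        rintro ⟨f, hf, hfs⟩
        have := (ex 3).mp ⟨f, hf, ((pvRank3 f).mpr hfs).le⟩; omega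
      simp [hc, hh, hmed, hlow, pvNames]
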